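-- pv_equiv track=rewrite | github.com/ConnorForr/aoc2023 | Day 3/day3_part2.py | left_row_check
-- ===== SOURCE A (Python) =====
-- def left_row_check(left_row):
--     part_numbers = []
--     number = ""
--     total_parts = 0
--     for index, value in enumerate(left_row):
--
--         if value.isdigit() and index == 2:
--             number += value
--             total_parts += 1
--             part_numbers.append(int(number))
--
--         elif value.isdigit():
--             number += value
--
--         else:
--             number = ""
--
--     return total_parts, part_numbers
-- ===== SOURCE B (Python) =====
-- def left_row_check(left_row):
--     # Result is fully determined by the digit run ending at index 2.
--     if len(left_row) <= 2 or not left_row[2].isdigit():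
--         return 0, []
--     start = 2
--     while start > 0 and left_row[start - 1].isdigit():
--         start -= 1
--     return 1, [int("".join(left_row[start:3]))]
-- ===== Notes on version B (the rewrite author's own statement) =====
-- stated objective: simpler
-- what changed: A scans the whole row forward maintaining a running digit string with resets; B observes that the result is fully determined by the contiguous digit run ending at index 2, so it guards on left_row[2].isdigit() and scans backward at most two steps to find the run's start.
import Mathlib
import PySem

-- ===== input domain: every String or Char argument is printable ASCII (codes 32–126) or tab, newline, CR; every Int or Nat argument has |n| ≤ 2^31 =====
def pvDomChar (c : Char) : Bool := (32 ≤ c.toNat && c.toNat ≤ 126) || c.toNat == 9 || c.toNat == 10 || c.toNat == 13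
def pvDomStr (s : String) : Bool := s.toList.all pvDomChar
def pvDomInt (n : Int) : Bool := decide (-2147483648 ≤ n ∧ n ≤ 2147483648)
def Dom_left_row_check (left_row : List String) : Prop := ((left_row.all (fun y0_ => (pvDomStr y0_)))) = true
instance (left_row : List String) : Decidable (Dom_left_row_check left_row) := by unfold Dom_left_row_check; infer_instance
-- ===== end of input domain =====

-- B replaces A's full-row forward scan (with reset bookkeeping) by a guard at index 2
-- plus a short backward scan for the start of the digit run (objective: simpler).

-- ===== PORT A =====
-- the for-loop over enumerate(left_row); state = (number as List Char, total_parts, part_numbers)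
def pvLoopA : List String → Nat → List Char × Int × List Int → List Char × Int × List Int
  | [], _, st => st
  | v :: rest, idx, (number, total, parts) =>
    if PySem.Str.strIsdigit v && (idx == 2) then
      pvLoopA rest (idx + 1)
        (number ++ v.toList, total + 1,
         parts ++ [(PySem.Int.ofChars? (number ++ v.toList)).getD 0])  -- int(number); digits only here, never a ValueError
    else if PySem.Str.strIsdigit v then
      pvLoopA rest (idx + 1) (number ++ v.toList, total, parts)
    else
      pvLoopA rest (idx + 1) ([], total, parts)

def left_row_check (left_row : List String) : Int × List Int :=
  let st := pvLoopA left_row 0 ([], 0, [])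
  (st.2.1, st.2.2)

-- ===== PORT B =====
-- the while-loop 'while start > 0 and left_row[start-1].isdigit(): start -= 1', recursion on start
def pvAltStart (l : List String) : Nat → Nat
  | 0 => 0
  | s + 1 => if PySem.Str.strIsdigit ((PySem.List.pyGet? l (s : Int)).getD "") then pvAltStart l s else s + 1

def left_row_check_alt (left_row : List String) : Int × List Int :=
  match PySem.List.pyGet? left_row (2 : Int) with   -- 'len(left_row) <= 2': no element at index 2
  | none => (0, [])
  | some v =>
    if PySem.Str.strIsdigit v then
      let start := pvAltStart left_row 2
      (1, [(PySem.Int.ofChars? (PySem.Chars.join []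
              ((PySem.List.slice left_row (some (start : Int)) (some 3)).map String.toList))).getD 0])
    else (0, [])

-- ===== PRECONDITION & SPEC =====
def Spec_left_row_check (left_row : List String) (out : Int × List Int) : Prop := out = left_row_check_alt left_row
instance (left_row : List String) (out : Int × List Int) : Decidable (Spec_left_row_check left_row out) := by unfold Spec_left_row_check; infer_instance

-- ===== CLAIM (what is proved, stated in full; the proofs are below) =====
def Claim_equal_left_row_check : Prop := ∀ (left_row : List String), Dom_left_row_check left_row → Spec_left_row_check left_row (left_row_check left_row)

-- ===== LEMMAS AND PROOFS =====

-- once index ≥ 3, the loop body only touches `number`: total/parts are frozen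
theorem pvLoopA_tail (rest : List String) : ∀ (idx : Nat) (st : List Char × Int × List Int),
    3 ≤ idx → (pvLoopA rest idx st).2 = st.2 := by
  induction rest with
  | nil => intro idx st _; rfl
  | cons v r ih =>
    intro idx st h
    obtain ⟨n, t, p⟩ := st
    have hne : (idx == 2) = false := by simp; omega
    simp only [pvLoopA, hne, Bool.and_false, Bool.false_eq_true, if_false]
    by_cases hv : PySem.Str.strIsdigit v = true
    · rw [if_pos hv]; exact ih _ _ (by omega)
    · rw [if_neg hv]; exact ih _ _ (by omega)

-- ===== VERDICT (by name: the statement is the Claim_ definition above) =====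
theorem left_row_check_spec : Claim_equal_left_row_check := by
  intro l _
  unfold Spec_left_row_check
  match l with
  | [] => rfl
  | [a] =>
    by_cases ha : PySem.Chars.strIsdigit a.toList <;>
      simp [left_row_check, left_row_check_alt, pvLoopA, ha, PySem.List.pyGet?, PySem.List.pyIdx?]
  | [a, b] =>
    by_cases ha : PySem.Chars.strIsdigit a.toList <;> by_cases hb : PySem.Chars.strIsdigit b.toList <;>
      simp [left_row_check, left_row_check_alt, pvLoopA, ha, hb, PySem.List.pyGet?, PySem.List.pyIdx?]
  | a :: b :: c :: rest =>
    have g2 : PySem.List.pyGet? (a :: b :: c :: rest) (2 : Int) = some c := by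
      have h : (2:Int) ≤ ↑rest.length + 1 + 1 := by omega
      simp [PySem.List.pyGet?, PySem.List.pyIdx?, h]
    have g1 : PySem.List.pyGet? (a :: b :: c :: rest) (1 : Int) = some b := by
      have h : (0:Int) ≤ ↑rest.length + 1 := by omega
      simp [PySem.List.pyGet?, PySem.List.pyIdx?, h]
    have g0 : PySem.List.pyGet? (a :: b :: c :: rest) (0 : Int) = some a := by
      have h : (0:Int) ≤ ↑rest.length + 1 + 1 := by omega
      simp [PySem.List.pyGet?, PySem.List.pyIdx?, h]
    have s0 : PySem.List.slice (a :: b :: c :: rest) (some (0 : Int)) (some 3) = [a,b,c] := by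
      rw [PySem.List.slice_toNat] <;> simp [List.take]
    have s1 : PySem.List.slice (a :: b :: c :: rest) (some (1 : Int)) (some 3) = [b,c] := by
      rw [PySem.List.slice_toNat] <;> simp [List.take]
    have s2 : PySem.List.slice (a :: b :: c :: rest) (some (2 : Int)) (some 3) = [c] := by
      rw [PySem.List.slice_toNat] <;> simp [List.take]
    by_cases hc : PySem.Chars.strIsdigit c.toList <;>
      by_cases hb : PySem.Chars.strIsdigit b.toList <;>
      by_cases ha : PySem.Chars.strIsdigit a.toList <;>
      simp [left_row_check, left_row_check_alt, pvLoopA, pvAltStart, ha, hb, hc,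
            g2, g1, g0, s0, s1, s2, pvLoopA_tail,
            PySem.Chars.join, List.intercalate, List.intersperse]
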